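-- pv_equiv track=rewrite | github.com/metminwi/HvM | game/ai.py | _extract_lines
-- ===== SOURCE A (Python) =====
-- EMPTY = ""
--
-- def _extract_lines(board):
--     n = len(board)
--     lines = []
--
--     # Lignes horizontales
--     for r in range(n):
--         lines.append("".join(board[r][c] if board[r][c] != EMPTY else "." for c in range(n)))
--
--     # Colonnes
--     for c in range(n):
--         col = []
--         for r in range(n):
--             col.append(board[r][c] if board[r][c] != EMPTY else ".")
--         lines.append("".join(col))
--
--     # Diagonales (↘)
--     for k in range(-n + 1, n):
--         diag = []
--         for r in range(n):
--             c = r + k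
--             if 0 <= c < n:
--                 diag.append(board[r][c] if board[r][c] != EMPTY else ".")
--         if len(diag) >= 5:
--             lines.append("".join(diag))
--
--     # Diagonales (↗)
--     for k in range(0, 2 * n - 1):
--         diag = []
--         for r in range(n):
--             c = k - r
--             if 0 <= c < n:
--                 diag.append(board[r][c] if board[r][c] != EMPTY else ".")
--         if len(diag) >= 5:
--             lines.append("".join(diag))
--
--     return lines
-- ===== SOURCE B (Python) =====
-- EMPTY = ""
--
-- def _extract_lines(board):
--     # One pass over all cells bucketing into four dicts keyed by row, col,
--     # c-r (down diagonals) and r+c (up diagonals), then read keys in order.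
--     n = len(board)
--     rows = {r: [] for r in range(n)}
--     cols = {c: [] for c in range(n)}
--     down = {k: [] for k in range(-n + 1, n)}
--     up = {k: [] for k in range(0, 2 * n - 1)}
--     for r in range(n):
--         for c in range(n):
--             ch = board[r][c] if board[r][c] != EMPTY else "."
--             rows[r].append(ch)
--             cols[c].append(ch)
--             down[c - r].append(ch)
--             up[r + c].append(ch)
--     lines = ["".join(rows[r]) for r in range(n)]
--     lines += ["".join(cols[c]) for c in range(n)]
--     lines += ["".join(down[k]) for k in range(-n + 1, n) if len(down[k]) >= 5]
--     lines += ["".join(up[k]) for k in range(0, 2 * n - 1) if len(up[k]) >= 5]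
--     return lines
-- ===== Notes on version B (the rewrite author's own statement) =====
-- stated objective: alternative
-- what changed: Replaces A's four separate nested scans (with per-diagonal bounds-checked inner loops) by a single pass over all cells that buckets each cell into four dicts keyed by r, c, c-r and r+c, then builds the output by reading the dicts in key order.
import Mathlib
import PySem

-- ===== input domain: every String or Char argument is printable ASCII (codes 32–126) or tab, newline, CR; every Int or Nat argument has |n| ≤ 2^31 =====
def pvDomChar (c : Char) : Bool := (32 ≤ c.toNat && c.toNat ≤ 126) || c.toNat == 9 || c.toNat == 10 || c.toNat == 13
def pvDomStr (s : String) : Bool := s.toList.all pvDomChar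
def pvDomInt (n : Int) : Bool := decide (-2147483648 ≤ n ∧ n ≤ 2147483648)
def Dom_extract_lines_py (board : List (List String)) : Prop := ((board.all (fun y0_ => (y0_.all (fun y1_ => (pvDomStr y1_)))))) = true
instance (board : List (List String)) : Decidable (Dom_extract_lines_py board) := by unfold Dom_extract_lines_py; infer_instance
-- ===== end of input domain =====

-- B replaces A's four nested scans by one bucketing pass into four dicts (rows, cols, c-r, r+c) read back in key order; alternative decomposition, equivalent on boards whose rows are long enough.


-- ===== PORT A =====
-- board[r][c] (indices always ≥ 0, in range under Pre_) ported via pyGetD; the if-else mirrors `board[r][c] if board[r][c] != EMPTY else "."`.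
def pvCellA (board : List (List String)) (r c : Int) : String :=
  let v := PySem.List.pyGetD (PySem.List.pyGetD board r []) c ""
  if v ≠ "" then v else "."

def extract_lines_py (board : List (List String)) : List String :=
  let n : Int := PySem.List.len board
  let lines : List String :=
    (PySem.List.pyRange 0 n 1).foldl (fun acc r =>
      acc ++ [PySem.Str.join "" ((PySem.List.pyRange 0 n 1).map (fun c => pvCellA board r c))]) []
  let lines :=
    (PySem.List.pyRange 0 n 1).foldl (fun acc c =>
      let col := (PySem.List.pyRange 0 n 1).foldl (fun col r => col ++ [pvCellA board r c]) []
      acc ++ [PySem.Str.join "" col]) lines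
  let lines :=
    (PySem.List.pyRange (-n + 1) n 1).foldl (fun acc k =>
      let diag := (PySem.List.pyRange 0 n 1).foldl (fun diag r =>
        let c := r + k
        if 0 ≤ c ∧ c < n then diag ++ [pvCellA board r c] else diag) []
      if 5 ≤ diag.length then acc ++ [PySem.Str.join "" diag] else acc) lines
  let lines :=
    (PySem.List.pyRange 0 (2 * n - 1) 1).foldl (fun acc k =>
      let diag := (PySem.List.pyRange 0 n 1).foldl (fun diag r =>
        let c := k - r
        if 0 ≤ c ∧ c < n then diag ++ [pvCellA board r c] else diag) []
      if 5 ≤ diag.length then acc ++ [PySem.Str.join "" diag] else acc) lines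
  lines

-- ===== PORT B =====
-- {k: [] for k in R} : dict pre-initialized with empty lists
def pvInitDict (R : List Int) : PySem.Dict Int (List String) :=
  R.foldl (fun d k => d.insert k ([] : List String)) PySem.Dict.empty

-- `d[k].append(ch)` on a pre-initialized dict
def pvAppendAt (d : PySem.Dict Int (List String)) (k : Int) (ch : String) :
    PySem.Dict Int (List String) :=
  d.modify k [] (fun l => l ++ [ch])

def extract_lines_py_alt (board : List (List String)) : List String :=
  let n : Int := PySem.List.len board
  let st :=
    (PySem.List.pyRange 0 n 1).foldl (fun st r =>
      (PySem.List.pyRange 0 n 1).foldl (fun st c =>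
        let v := PySem.List.pyGetD (PySem.List.pyGetD board r []) c ""
        let ch := if v ≠ "" then v else "."
        (pvAppendAt st.1 r ch,
         pvAppendAt st.2.1 c ch,
         pvAppendAt st.2.2.1 (c - r) ch,
         pvAppendAt st.2.2.2 (r + c) ch)) st)
      (pvInitDict (PySem.List.pyRange 0 n 1),
       pvInitDict (PySem.List.pyRange 0 n 1),
       pvInitDict (PySem.List.pyRange (-n + 1) n 1),
       pvInitDict (PySem.List.pyRange 0 (2 * n - 1) 1))
  let lines : List String :=
    (PySem.List.pyRange 0 n 1).map (fun r => PySem.Str.join "" (st.1.getD r []))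
  let lines := lines ++
    (PySem.List.pyRange 0 n 1).map (fun c => PySem.Str.join "" (st.2.1.getD c []))
  let lines := lines ++
    (((PySem.List.pyRange (-n + 1) n 1).filter
        (fun k => 5 ≤ (st.2.2.1.getD k []).length)).map
      (fun k => PySem.Str.join "" (st.2.2.1.getD k [])))
  let lines := lines ++
    (((PySem.List.pyRange 0 (2 * n - 1) 1).filter
        (fun k => 5 ≤ (st.2.2.2.getD k []).length)).map
      (fun k => PySem.Str.join "" (st.2.2.2.getD k [])))
  lines

-- ===== PRECONDITION & SPEC =====
-- Pre_ excludes exactly the ragged boards on which Python A raises IndexError (some row shorter than the board).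
def Pre_extract_lines_py (board : List (List String)) : Prop :=
  ∀ row ∈ board, board.length ≤ row.length
instance (board : List (List String)) : Decidable (Pre_extract_lines_py board) := by
  unfold Pre_extract_lines_py; infer_instance
def pvWitness_extract_lines_py : List (List String) := [["X", ""], ["", "O"]]

def Spec_extract_lines_py (board : List (List String)) (out : List String) : Prop := out = extract_lines_py_alt board
instance (board : List (List String)) (out : List String) : Decidable (Spec_extract_lines_py board out) := by unfold Spec_extract_lines_py; infer_instance

-- ===== CLAIM (what is proved, stated in full; the proofs are below) =====
def Claim_equal_extract_lines_py : Prop := ∀ (board : List (List String)), Dom_extract_lines_py board → Pre_extract_lines_py board → Spec_extract_lines_py board (extract_lines_py board)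

-- ===== LEMMAS AND PROOFS =====

-- dict value type and proof-side helpers
abbrev PvD : Type := PySem.Dict Int (List String)

def pvCh (board : List (List String)) (p : Int × Int) : String := pvCellA board p.1 p.2

def pvStep (board : List (List String)) (st : PvD × PvD × PvD × PvD) (p : Int × Int) :
    PvD × PvD × PvD × PvD :=
  (pvAppendAt st.1 p.1 (pvCh board p), pvAppendAt st.2.1 p.2 (pvCh board p),
   pvAppendAt st.2.2.1 (p.2 - p.1) (pvCh board p), pvAppendAt st.2.2.2 (p.1 + p.2) (pvCh board p))

def pvPairs (rs cs : List Int) : List (Int × Int) := rs.flatMap (fun r => cs.map (fun c => (r, c)))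

def pvDownDiag (board : List (List String)) (n k : Int) : List String :=
  ((PySem.List.pyRange 0 n 1).filter (fun r => decide (0 ≤ r + k ∧ r + k < n))).map
    (fun r => pvCellA board r (r + k))

def pvUpDiag (board : List (List String)) (n k : Int) : List String :=
  ((PySem.List.pyRange 0 n 1).filter (fun r => decide (0 ≤ k - r ∧ k - r < n))).map
    (fun r => pvCellA board r (k - r))

def pvSpec (board : List (List String)) : List String :=
  let n : Int := PySem.List.len board
  ((PySem.List.pyRange 0 n 1).map fun r =>
      PySem.Str.join "" ((PySem.List.pyRange 0 n 1).map fun c => pvCellA board r c))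
  ++ ((PySem.List.pyRange 0 n 1).map fun c =>
      PySem.Str.join "" ((PySem.List.pyRange 0 n 1).map fun r => pvCellA board r c))
  ++ (((PySem.List.pyRange (-n + 1) n 1).filter fun k =>
        decide (5 ≤ (pvDownDiag board n k).length)).map fun k =>
      PySem.Str.join "" (pvDownDiag board n k))
  ++ (((PySem.List.pyRange 0 (2 * n - 1) 1).filter fun k =>
        decide (5 ≤ (pvUpDiag board n k).length)).map fun k =>
      PySem.Str.join "" (pvUpDiag board n k))

theorem pvLoop_eq (board : List (List String)) (rs cs : List Int) (st : PvD × PvD × PvD × PvD) :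
    rs.foldl (fun st r => cs.foldl (fun st c => pvStep board st (r, c)) st) st
      = (pvPairs rs cs).foldl (pvStep board) st := by
  induction rs generalizing st with
  | nil => rfl
  | cons r rs ih =>
    simp only [List.foldl_cons, pvPairs, List.flatMap_cons, List.foldl_append, List.foldl_map]
    exact ih _

theorem pvFoldl_step_eq (board : List (List String)) (l : List (Int × Int))
    (a b c d : PvD) :
    l.foldl (pvStep board) (a, b, c, d)
      = (l.foldl (fun d' p => pvAppendAt d' p.1 (pvCh board p)) a,
         l.foldl (fun d' p => pvAppendAt d' p.2 (pvCh board p)) b,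
         l.foldl (fun d' p => pvAppendAt d' (p.2 - p.1) (pvCh board p)) c,
         l.foldl (fun d' p => pvAppendAt d' (p.1 + p.2) (pvCh board p)) d) := by
  induction l generalizing a b c d with
  | nil => rfl
  | cons p t ih => simp only [List.foldl_cons, pvStep]; exact ih _ _ _ _

theorem pvGetD_foldl_appendAt (key : Int × Int → Int) (ch : Int × Int → String)
    (l : List (Int × Int)) (d0 : PvD) (k : Int) :
    (l.foldl (fun d p => pvAppendAt d (key p) (ch p)) d0).getD k []
      = d0.getD k [] ++ (l.filter (fun p => key p == k)).map ch := by
  induction l generalizing d0 with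
  | nil => simp
  | cons p t ih =>
    simp only [List.foldl_cons, List.filter_cons]
    rw [ih]
    by_cases h : key p = k
    · simp [h, pvAppendAt]
    · have h' : ¬ k = key p := fun hh => h hh.symm
      simp [h, h', pvAppendAt, PySem.Dict.getD_modify]

theorem pvGetD_init_aux (R : List Int) (d : PvD) (k : Int)
    (h : d.getD k ([] : List String) = []) :
    (R.foldl (fun d k' => d.insert k' ([] : List String)) d).getD k [] = [] := by
  induction R generalizing d with
  | nil => exact h
  | cons a t ih =>
    refine ih _ ?_
    rw [PySem.Dict.getD_insert]
    split
    · rfl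
    · exact h

theorem pvGetD_init (R : List Int) (k : Int) : (pvInitDict R).getD k [] = [] :=
  pvGetD_init_aux R PySem.Dict.empty k (PySem.Dict.getD_empty k [])

theorem pvFilter_beq_pyRange (n v : Int) :
    (PySem.List.pyRange 0 n 1).filter (fun c => c == v)
      = if 0 ≤ v ∧ v < n then [v] else [] := by
  rw [show (fun c : Int => c == v) = (· == v) from rfl, List.filter_beq]
  by_cases h : v ∈ PySem.List.pyRange 0 n 1
  · rw [List.count_eq_one_of_mem (PySem.List.nodup_pyRange_one 0 n) h]
    rw [PySem.List.mem_pyRange_one] at h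
    simp [h]
  · rw [List.count_eq_zero_of_not_mem h]
    rw [PySem.List.mem_pyRange_one] at h
    simp [h]

theorem pvFilter_shift (n : Int) (_r _k : Int) (q : Int → Bool) (v : Int)
    (hq : ∀ c : Int, q c = (c == v)) :
    (PySem.List.pyRange 0 n 1).filter q = if 0 ≤ v ∧ v < n then [v] else [] := by
  rw [List.filter_congr (fun c _ => hq c), ← pvFilter_beq_pyRange n v]

theorem pvFlatMap_ite_singleton {α β : Type} (l : List α) (p : α → Prop) [DecidablePred p]
    (f : α → β) :
    l.flatMap (fun x => if p x then [f x] else [])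
      = (l.filter (fun x => decide (p x))).map f := by
  induction l with
  | nil => rfl
  | cons a t ih =>
    simp only [List.flatMap_cons, List.filter_cons, ih]
    by_cases h : p a <;> simp [h]

theorem pvBucket_eq (rs cs : List Int) (q : Int × Int → Bool) (ch : Int × Int → String) :
    ((pvPairs rs cs).filter q).map ch
      = rs.flatMap (fun r => (cs.filter (fun c => q (r, c))).map (fun c => ch (r, c))) := by
  induction rs with
  | nil => rfl
  | cons r rs ih =>
    simp only [pvPairs, List.flatMap_cons, List.filter_append, List.map_append,
      List.filter_map, List.map_map] at *
    rw [ih]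
    rfl

theorem pvFlatMap_pick_nil {β : Type} (l : List Int) (h : Int → List β) (r0 : Int)
    (hn : r0 ∉ l) : l.flatMap (fun r => if r = r0 then h r else []) = [] := by
  induction l with
  | nil => rfl
  | cons a t ih =>
    simp only [List.mem_cons, not_or] at hn
    rw [List.flatMap_cons, if_neg (show ¬ a = r0 from fun hh => hn.1 hh.symm), List.nil_append]
    exact ih hn.2

theorem pvFlatMap_pick {β : Type} (l : List Int) (hl : l.Nodup) (h : Int → List β) (r0 : Int) :
    l.flatMap (fun r => if r = r0 then h r else [])
      = if r0 ∈ l then h r0 else [] := by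
  induction l with
  | nil => rfl
  | cons a t ih =>
    rcases List.nodup_cons.mp hl with ⟨ha, ht⟩
    simp only [List.flatMap_cons, List.mem_cons]
    by_cases hr : a = r0
    · subst hr
      rw [if_pos rfl, if_pos (Or.inl rfl), pvFlatMap_pick_nil t h a ha, List.append_nil]
    · rw [if_neg hr, List.nil_append, ih ht]
      by_cases hm : r0 ∈ t
      · rw [if_pos hm, if_pos (Or.inr hm)]
      · rw [if_neg hm, if_neg (by rintro (h1 | h2); exact hr h1.symm; exact hm h2)]

theorem pvRowBucket (board : List (List String)) (n r0 : Int) :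
    (((pvPairs (PySem.List.pyRange 0 n 1) (PySem.List.pyRange 0 n 1)).filter
        (fun p => p.1 == r0)).map (pvCh board))
      = if 0 ≤ r0 ∧ r0 < n then
          (PySem.List.pyRange 0 n 1).map (fun c => pvCellA board r0 c)
        else [] := by
  rw [pvBucket_eq]
  have h1 : ∀ r : Int,
      ((PySem.List.pyRange 0 n 1).filter (fun c => ((r, c) : Int × Int).1 == r0)).map
          (fun c => pvCh board (r, c))
        = if r = r0 then (PySem.List.pyRange 0 n 1).map (fun c => pvCellA board r0 c)
          else [] := by
    intro r
    by_cases h : r = r0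
    · subst h; simp [pvCh]
    · simp [h]
  calc (PySem.List.pyRange 0 n 1).flatMap (fun r =>
          ((PySem.List.pyRange 0 n 1).filter (fun c => ((r, c) : Int × Int).1 == r0)).map
            (fun c => pvCh board (r, c)))
      = (PySem.List.pyRange 0 n 1).flatMap (fun r =>
          if r = r0 then (PySem.List.pyRange 0 n 1).map (fun c => pvCellA board r0 c)
          else []) := by
        exact List.flatMap_congr (fun r _ => h1 r)
    _ = _ := by
        rw [pvFlatMap_pick _ (PySem.List.nodup_pyRange_one 0 n)]
        by_cases h : 0 ≤ r0 ∧ r0 < n <;>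
          simp [PySem.List.mem_pyRange_one, h]

theorem pvColBucket (board : List (List String)) (n c0 : Int) :
    (((pvPairs (PySem.List.pyRange 0 n 1) (PySem.List.pyRange 0 n 1)).filter
        (fun p => p.2 == c0)).map (pvCh board))
      = if 0 ≤ c0 ∧ c0 < n then
          (PySem.List.pyRange 0 n 1).map (fun r => pvCellA board r c0)
        else [] := by
  rw [pvBucket_eq]
  have h1 : ∀ r : Int,
      ((PySem.List.pyRange 0 n 1).filter (fun c => ((r, c) : Int × Int).2 == c0)).map
          (fun c => pvCh board (r, c))
        = if 0 ≤ c0 ∧ c0 < n then [pvCellA board r c0] else [] := by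
    intro r
    rw [show (fun c : Int => ((r, c) : Int × Int).2 == c0) = (fun c : Int => c == c0) from rfl,
      pvFilter_beq_pyRange]
    by_cases h : 0 ≤ c0 ∧ c0 < n <;> simp [h, pvCh]
  rw [List.flatMap_congr (fun r _ => h1 r)]
  by_cases h : 0 ≤ c0 ∧ c0 < n
  · simp only [if_pos h]
    exact (List.map_eq_flatMap).symm
  · simp [if_neg h]

theorem pvDownBucket (board : List (List String)) (n k : Int) :
    (((pvPairs (PySem.List.pyRange 0 n 1) (PySem.List.pyRange 0 n 1)).filter
        (fun p => p.2 - p.1 == k)).map (pvCh board))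
      = pvDownDiag board n k := by
  rw [pvBucket_eq]
  have h1 : ∀ r : Int,
      ((PySem.List.pyRange 0 n 1).filter
          (fun c => ((r, c) : Int × Int).2 - ((r, c) : Int × Int).1 == k)).map
          (fun c => pvCh board (r, c))
        = if 0 ≤ r + k ∧ r + k < n then [pvCellA board r (r + k)] else [] := by
    intro r
    rw [pvFilter_shift n r k _ (r + k)
      (fun c => by
        rw [Bool.eq_iff_iff]; simp only [beq_iff_eq]; omega)]
    split <;> rfl
  rw [List.flatMap_congr (fun r _ => h1 r), pvDownDiag,
    pvFlatMap_ite_singleton (PySem.List.pyRange 0 n 1)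
      (fun r => 0 ≤ r + k ∧ r + k < n) (fun r => pvCellA board r (r + k))]

theorem pvUpBucket (board : List (List String)) (n k : Int) :
    (((pvPairs (PySem.List.pyRange 0 n 1) (PySem.List.pyRange 0 n 1)).filter
        (fun p => p.1 + p.2 == k)).map (pvCh board))
      = pvUpDiag board n k := by
  rw [pvBucket_eq]
  have h1 : ∀ r : Int,
      ((PySem.List.pyRange 0 n 1).filter
          (fun c => ((r, c) : Int × Int).1 + ((r, c) : Int × Int).2 == k)).map
          (fun c => pvCh board (r, c))
        = if 0 ≤ k - r ∧ k - r < n then [pvCellA board r (k - r)] else [] := by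
    intro r
    rw [pvFilter_shift n r k _ (k - r)
      (fun c => by
        rw [Bool.eq_iff_iff]; simp only [beq_iff_eq]; omega)]
    split <;> rfl
  rw [List.flatMap_congr (fun r _ => h1 r), pvUpDiag,
    pvFlatMap_ite_singleton (PySem.List.pyRange 0 n 1)
      (fun r => 0 ≤ k - r ∧ k - r < n) (fun r => pvCellA board r (k - r))]

theorem pvA_eq (board : List (List String)) : extract_lines_py board = pvSpec board := by
  simp only [extract_lines_py, pvSpec, pvDownDiag, pvUpDiag,
    PySem.List.foldl_append_singleton_eq_map, PySem.List.foldl_append_ite,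
    List.nil_append, List.append_assoc]
  rfl

theorem pvB_eq (board : List (List String)) : extract_lines_py_alt board = pvSpec board := by
  show
    (let n : Int := PySem.List.len board
     let st :=
       (PySem.List.pyRange 0 n 1).foldl (fun st r =>
         (PySem.List.pyRange 0 n 1).foldl (fun st c => pvStep board st (r, c)) st)
         (pvInitDict (PySem.List.pyRange 0 n 1),
          pvInitDict (PySem.List.pyRange 0 n 1),
          pvInitDict (PySem.List.pyRange (-n + 1) n 1),
          pvInitDict (PySem.List.pyRange 0 (2 * n - 1) 1))
     let lines : List String :=
       (PySem.List.pyRange 0 n 1).map (fun r => PySem.Str.join "" (st.1.getD r []))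
     let lines := lines ++
       (PySem.List.pyRange 0 n 1).map (fun c => PySem.Str.join "" (st.2.1.getD c []))
     let lines := lines ++
       (((PySem.List.pyRange (-n + 1) n 1).filter
           (fun k => 5 ≤ (st.2.2.1.getD k []).length)).map
         (fun k => PySem.Str.join "" (st.2.2.1.getD k [])))
     let lines := lines ++
       (((PySem.List.pyRange 0 (2 * n - 1) 1).filter
           (fun k => 5 ≤ (st.2.2.2.getD k []).length)).map
         (fun k => PySem.Str.join "" (st.2.2.2.getD k [])))
     lines) = pvSpec board
  simp only [pvLoop_eq, pvFoldl_step_eq]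
  simp only [pvGetD_foldl_appendAt, pvGetD_init, List.nil_append,
    pvRowBucket, pvColBucket, pvDownBucket, pvUpBucket, pvSpec, List.append_assoc]
  congr 1
  · exact List.map_congr_left (fun r hr => by
      rw [if_pos (PySem.List.mem_pyRange_one.mp hr)])
  congr 1
  · exact List.map_congr_left (fun c hc => by
      rw [if_pos (PySem.List.mem_pyRange_one.mp hc)])

-- ===== VERDICT (by name: the statement is the Claim_ definition above) =====
theorem extract_lines_py_spec : Claim_equal_extract_lines_py := by
  intro board _ _
  unfold Spec_extract_lines_py
  rw [pvA_eq, pvB_eq]
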